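-- pv_equiv track=rewrite | github.com/pypi-data/pypi-mirror-401 | packages/etpgrf/etpgrf-0.1.3.tar.gz/etpgrf-0.1.3/etpgrf/comutil.py | is_inside_unbreakable_segment
-- ===== SOURCE A (Python) =====
-- def is_inside_unbreakable_segment(
--     word_segment: str,
--     split_index: int,
--     unbreakable_set: frozenset[str] | list[str] | set[str],
-- ) -> bool:
--     """
--     Проверяет, находится ли позиция разбиения внутри неразрывного сегмента.
--
--     :param word_segment: -- Сегмент слова, в котором мы ищем позицию разбиения.
--     :param split_index: -- Индекс (позиция внутри сегмента), по которому мы хотим проверить разбиение.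
--     :param unbreakable_set: -- Набор неразрывных сегментов (например: диграфы, триграфы, акронимы...).
--     :return:
--     """
--     segment_len = len(word_segment)
--     # Проверяем, что позиция разбиения не выходит за границы сегмента
--     if not (0 < split_index < segment_len):
--         return False
--     # Пер образуем все в верхний регистр, чтобы сравнения строк работали
--     word_segment_upper = word_segment.upper()
--     # unbreakable_set_upper = (unit.upper() for unit in unbreakable_set)        # <-- С помощью генератора
--
--     # Отсортируем unbreakable_set по длине лексем (чем короче, тем больше шансов на "ранний выход")
--     # и заодно превратим в list
--     sorted_units = sorted(unbreakable_set, key=len)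
--     # sorted_units = sorted(unbreakable_set_upper, key=len)
--     for unbreakable in sorted_units:
--         unit_len = len(unbreakable)
--         if unit_len < 2:
--             continue
--         # Спорно, что преобразование в верхний регистр эффективнее делать тут, но благодаря возможному
--         # "раннему выходу" это может быть быстрее с помощью генератора (см. выше комментарии)
--         unbreakable_upper = unbreakable.upper()
--         for offset in range(1, unit_len):
--             position_start_in_segment = split_index - offset
--             position_end_in_segment = position_start_in_segment + unit_len
--             # Убедимся, что предполагаемое положение 'unit' не выходит за границы word_segment
--             if position_start_in_segment >= 0 and position_end_in_segment <= segment_len and \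
--                     word_segment_upper[position_start_in_segment:position_end_in_segment] == unbreakable_upper:
--                 # Нашли 'unbreakable', и split_index находится внутри него.
--                 return True
--     return False
-- ===== SOURCE B (Python) =====
-- def is_inside_unbreakable_segment(
--     word_segment: str,
--     split_index: int,
--     unbreakable_set,
-- ) -> bool:
--     segment_len = len(word_segment)
--     if not (0 < split_index < segment_len):
--         return False
--     word_upper = word_segment.upper()
--     units = {unit.upper() for unit in unbreakable_set}
--     max_len = max((len(unit) for unit in units), default=0)
--     for start in range(max(0, split_index - max_len + 1), split_index):
--         for end in range(split_index + 1, min(segment_len, start + max_len) + 1):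
--             if word_upper[start:end] in units:
--                 return True
--     return False
-- ===== Notes on version B (the rewrite author's own statement) =====
-- stated objective: alternative
-- what changed: Instead of sorting the units by length and sliding each unit across the split by offsets, B builds one uppercased set of units plus its maximum length, and enumerates the substrings of the segment that straddle the split (start < split_index < end, bounded by the maximum unit length), testing set membership; any straddling slice has length >= 2, so short units are excluded automatically and no sort is needed.
import Mathlib
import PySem

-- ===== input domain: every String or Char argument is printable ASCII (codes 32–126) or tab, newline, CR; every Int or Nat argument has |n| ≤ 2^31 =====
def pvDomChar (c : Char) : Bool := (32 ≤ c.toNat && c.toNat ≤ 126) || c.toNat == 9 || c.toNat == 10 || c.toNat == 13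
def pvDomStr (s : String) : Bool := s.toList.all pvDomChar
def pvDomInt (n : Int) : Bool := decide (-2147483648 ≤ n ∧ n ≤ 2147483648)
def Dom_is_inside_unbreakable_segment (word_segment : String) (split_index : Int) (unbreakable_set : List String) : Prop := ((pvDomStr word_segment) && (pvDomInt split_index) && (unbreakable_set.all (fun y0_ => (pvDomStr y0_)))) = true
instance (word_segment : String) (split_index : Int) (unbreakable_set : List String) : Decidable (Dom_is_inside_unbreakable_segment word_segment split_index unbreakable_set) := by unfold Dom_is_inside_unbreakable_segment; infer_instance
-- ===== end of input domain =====

-- B replaces A's sort-by-length + per-unit offset sweep by one uppercased unit set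
-- and a scan over all substrings straddling the split index (alternative decomposition, same result).


-- ===== PORT A =====
def is_inside_unbreakable_segment (word_segment : String) (split_index : Int) (unbreakable_set : List String) : Bool :=
  let segment_len : Int := PySem.Str.len word_segment
  if !(decide (0 < split_index) && decide (split_index < segment_len)) then false
  else
    let word_segment_upper := PySem.Str.upper word_segment
    let sorted_units := PySem.List.sorted unbreakable_set (fun u => PySem.Str.len u) false
    sorted_units.any (fun unbreakable =>
      let unit_len : Int := PySem.Str.len unbreakable
      if unit_len < 2 then false
      else
        let unbreakable_upper := PySem.Str.upper unbreakable
        (PySem.List.pyRange 1 unit_len 1).any (fun offset =>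
          let position_start_in_segment := split_index - offset
          let position_end_in_segment := position_start_in_segment + unit_len
          decide (0 ≤ position_start_in_segment) && decide (position_end_in_segment ≤ segment_len) &&
            (PySem.Str.slice word_segment_upper (some position_start_in_segment) (some position_end_in_segment) == unbreakable_upper)))

-- ===== PORT B =====
def is_inside_unbreakable_segment_alt (word_segment : String) (split_index : Int) (unbreakable_set : List String) : Bool :=
  let segment_len : Int := PySem.Str.len word_segment
  if !(decide (0 < split_index) && decide (split_index < segment_len)) then false
  else
    let word_upper := PySem.Str.upper word_segment
    let units := PySem.Set.ofList (unbreakable_set.map PySem.Str.upper)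
    let max_len : Int := ((PySem.List.max? (units.map PySem.Str.len) (fun x => x)).getD 0)
    (PySem.List.pyRange (max 0 (split_index - max_len + 1)) split_index 1).any (fun start =>
      (PySem.List.pyRange (split_index + 1) (min segment_len (start + max_len) + 1) 1).any (fun e =>
        PySem.Set.contains units (PySem.Str.slice word_upper (some start) (some e))))

-- ===== PRECONDITION & SPEC =====
def Spec_is_inside_unbreakable_segment (word_segment : String) (split_index : Int) (unbreakable_set : List String) (out : Bool) : Prop := out = is_inside_unbreakable_segment_alt word_segment split_index unbreakable_set
instance (word_segment : String) (split_index : Int) (unbreakable_set : List String) (out : Bool) : Decidable (Spec_is_inside_unbreakable_segment word_segment split_index unbreakable_set out) := by unfold Spec_is_inside_unbreakable_segment; infer_instance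

-- ===== CLAIM (what is proved, stated in full; the proofs are below) =====
def Claim_equal_is_inside_unbreakable_segment : Prop := ∀ (word_segment : String) (split_index : Int) (unbreakable_set : List String), Dom_is_inside_unbreakable_segment word_segment split_index unbreakable_set → Spec_is_inside_unbreakable_segment word_segment split_index unbreakable_set (is_inside_unbreakable_segment word_segment split_index unbreakable_set)

-- ===== LEMMAS AND PROOFS =====

theorem pv_length_upper (cs : List Char) : (PySem.Chars.upper cs).length = cs.length := by
  simp [PySem.Chars.upper]

theorem pv_length_slice (xs : List Char) (s e : Int) (h0 : 0 ≤ s) (hse : s ≤ e)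
    (he : e ≤ (xs.length : Int)) :
    ((PySem.List.slice xs (some s) (some e)).length : Int) = e - s := by
  rw [PySem.List.slice_of_nonneg xs h0 (le_trans h0 hse) (le_trans hse he) he]
  simp [List.length_take, List.length_drop]
  omega

-- ===== VERDICT =====
theorem is_inside_unbreakable_segment_spec : Claim_equal_is_inside_unbreakable_segment := by
  unfold Claim_equal_is_inside_unbreakable_segment
  intro ws si us _
  unfold Spec_is_inside_unbreakable_segment
  unfold is_inside_unbreakable_segment is_inside_unbreakable_segment_alt
  by_cases h1 : 0 < si
  · by_cases h2 : si < PySem.Str.len ws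
    · have hn : PySem.Str.len ws = (ws.toList.length : Int) := PySem.Str.len_eq ws
      rw [hn] at h2
      simp only [hn, h1, h2, decide_true, Bool.and_self, Bool.not_true]
      rw [Bool.eq_iff_iff]
      simp only [List.any_eq_true, PySem.List.mem_sorted, PySem.List.mem_pyRange_one,
        PySem.Set.contains_iff, PySem.Set.mem_ofList, List.mem_map,
        Bool.ite_eq_true_distrib, Bool.and_eq_true, decide_eq_true_eq,
        beq_iff_eq, ← String.toList_inj, PySem.Str.toList_slice, PySem.Str.toList_upper,
        Bool.false_eq_true, if_false]
      have hM : ∀ v ∈ us, (v.toList.length : Int) ≤ (PySem.List.max? ((PySem.Set.ofList (us.map PySem.Str.upper)).map PySem.Str.len) (fun x => x)).getD 0 := by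
        intro v hv
        have hmem : PySem.Str.len (PySem.Str.upper v) ∈ (PySem.Set.ofList (us.map PySem.Str.upper)).map PySem.Str.len :=
          List.mem_map.mpr ⟨PySem.Str.upper v, (PySem.Set.mem_ofList _ _).mpr (List.mem_map.mpr ⟨v, hv, rfl⟩), rfl⟩
        have hlv : PySem.Str.len (PySem.Str.upper v) = (v.toList.length : Int) := by
          rw [PySem.Str.len_eq, PySem.Str.toList_upper]
          exact_mod_cast congrArg Nat.cast (pv_length_upper v.toList)
        rcases hmax : PySem.List.max? ((PySem.Set.ofList (us.map PySem.Str.upper)).map PySem.Str.len) (fun x => x) with _ | m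
        · rw [PySem.List.max?_eq_none_iff] at hmax
          rw [hmax] at hmem; simp at hmem
        · have hle := PySem.List.max?_isMax hmax _ hmem
          rw [hlv] at hle; simpa using hle
      constructor
      · rintro ⟨u, hu, huu⟩
        by_cases hc : PySem.Str.len u < 2
        · rw [if_pos hc] at huu; exact huu.elim
        · rw [if_neg hc] at huu
          obtain ⟨off, ⟨ho1, ho2⟩, ⟨hs0, hend⟩, hslice⟩ := huu
          simp only [PySem.Str.len_eq] at ho2 hend
          have hum := hM u hu
          refine ⟨si - off, ⟨by omega, by omega⟩,
            si - off + (u.toList.length : Int), ⟨by omega, by omega⟩, u, hu, hslice.symm⟩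
      · rintro ⟨s, ⟨hs0, hssi⟩, e, ⟨he1, he2⟩, u, hu, hslice⟩
        have hwn : ((PySem.Chars.upper ws.toList).length : Int) = (ws.toList.length : Int) := by
          rw [pv_length_upper]
        have hum := hM u hu
        have hlen : ((PySem.Chars.slice (PySem.Chars.upper ws.toList) (some s) (some e)).length : Int) = e - s := by
          apply pv_length_slice _ s e (by omega) (by omega)
          rw [hwn]; omega
        rw [← hslice, pv_length_upper] at hlen
        refine ⟨u, hu, ?_⟩
        rw [if_neg]
        · refine ⟨si - s, ⟨by omega, ?_⟩, ⟨by omega, ?_⟩, ?_⟩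
          · simp only [PySem.Str.len_eq]; omega
          · simp only [PySem.Str.len_eq]; omega
          · simp only [PySem.Str.len_eq]
            have e1 : si - (si - s) = s := by ring
            rw [e1]
            have e2 : s + (u.toList.length : Int) = e := by omega
            rw [e2]; exact hslice.symm
        · simp only [PySem.Str.len_eq, not_lt]; omega
    · have h2' : ¬ si < (ws.length : Int) := by
        rw [PySem.Str.len_eq] at h2; simpa using h2
      simp [h2']
  · simp [h1]
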